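-- pv_equiv track=rewrite | github.com/juliepratx/Projets_Master_Bioinfo_Bordeaux | AssemblerADN/data_ADN_part2.py | BestReadChevauchant
-- ===== SOURCE A (Python) =====
-- def BestReadChevauchant(Read, ReadSet):
--     maximum = max_chev = 0; best_id = None
--     # contrôle de chaque Read du dictionnaire
--     for cle in ReadSet.keys():
--         # longueur du Read le plus court avec le chevauchement maximal
--         c = lmin = min(len(Read),len(ReadSet[cle][0][0]))
--         # test à partir du chevauchement maximal
--         while c > 0 and c <= lmin:
--             if ReadSet[cle][0][0][:c] == Read[-c:] or ReadSet[cle][0][0][-c:] == Read[0:c]: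
--                 max_chev = c
--                 break
--             else:
--                 c -= 1
--         if maximum < max_chev:
--             maximum = max_chev
--             best_id = cle
--     return best_id
-- ===== SOURCE B (Python) =====
-- def BestReadChevauchant(Read, ReadSet):
--     def overlap(other):
--         best = 0
--         for c in range(1, min(len(Read), len(other)) + 1):
--             if other[:c] == Read[len(Read) - c:] or other[len(other) - c:] == Read[:c]:
--                 best = c
--         return best
--     ov, best_id = max(((overlap(val[0][0]), key) for key, val in ReadSet.items()),
--                       key=lambda t: t[0], default=(0, None))
--     return best_id if ov > 0 else None
-- ===== Notes on version B (the rewrite author's own statement) =====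
-- stated objective: idiomatic
-- what changed: A's descending while-loop that breaks at the first matching overlap and carries max_chev across dict keys is replaced by a stateless ascending keep-last-match overlap helper plus a single max(..., key=..., default=...) selection over the dict items.
import Mathlib
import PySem

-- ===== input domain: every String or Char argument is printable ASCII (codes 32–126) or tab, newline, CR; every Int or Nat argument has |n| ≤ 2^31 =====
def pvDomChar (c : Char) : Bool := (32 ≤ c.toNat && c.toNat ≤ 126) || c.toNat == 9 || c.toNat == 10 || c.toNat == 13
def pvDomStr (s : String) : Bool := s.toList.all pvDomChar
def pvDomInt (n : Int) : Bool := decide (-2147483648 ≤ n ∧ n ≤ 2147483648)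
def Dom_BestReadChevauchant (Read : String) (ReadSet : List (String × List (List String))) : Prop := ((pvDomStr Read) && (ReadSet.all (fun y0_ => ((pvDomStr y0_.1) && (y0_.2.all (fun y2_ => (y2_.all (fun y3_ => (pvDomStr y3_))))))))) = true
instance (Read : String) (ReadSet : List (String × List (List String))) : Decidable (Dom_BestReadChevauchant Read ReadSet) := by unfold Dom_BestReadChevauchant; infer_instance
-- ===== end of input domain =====

-- B replaces A's descending break-on-first-match scan (with its max_chev carry-over state) by an
-- ascending keep-last-match overlap helper and one max(..., key, default) pass over the dict items;
-- same asymptotic cost, plainer structure (objective: idiomatic). Return value only; no mutation.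

-- ===== PORT A =====
-- the OR-test of A's while body: ReadSet[cle][0][0][:c] == Read[-c:] or ReadSet[cle][0][0][-c:] == Read[0:c]
def pvCondA (read other : List Char) (c : Nat) : Bool :=
  (PySem.List.slice other none (some (c : Int)) == PySem.List.slice read (some (-(c : Int))) none)
  || (PySem.List.slice other (some (-(c : Int))) none == PySem.List.slice read (some (0 : Int)) (some (c : Int)))

-- the while loop: c counts down from lmin; on the first c passing the test, max_chev := c and break
def pvWhileA (cond : Nat → Bool) (lmin : Nat) : Nat → Nat → Nat
  | 0, maxchev => maxchev
  | (c+1), maxchev =>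
    if c + 1 ≤ lmin then
      (if cond (c+1) then c + 1 else pvWhileA cond lmin c maxchev)
    else maxchev

def BestReadChevauchant (Read : String) (ReadSet : List (String × List (List String))) : Option String :=
  let d := PySem.Dict.ofList ReadSet
  -- state (maximum, max_chev, best_id); value[0][0] read with getD (index literal 0 — exact, never negative)
  let st := d.keys.foldl (fun (st : Nat × Nat × Option String) cle =>
      let other := (((d.getD cle []).getD 0 []).getD 0 "").toList
      let lmin := min Read.toList.length other.length
      let m' := pvWhileA (pvCondA Read.toList other) lmin lmin st.2.1
      if st.1 < m' then (m', m', some cle) else (st.1, m', st.2.2))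
    (0, 0, none)
  st.2.2

-- ===== PORT B =====
-- the OR-test of Source B's overlap helper, positive slices only: other[:c], Read[len(Read)-c:], other[len(other)-c:], Read[:c]
def pvCondB (read other : List Char) (c : Nat) : Bool :=
  (other.take c == read.drop (read.length - c)) || (other.drop (other.length - c) == read.take c)

-- 'best = 0; for c in range(1, lim+1): if ...: best = c' (range(1, lim+1) walked as base-1 offsets)
def pvBestAsc (cond : Nat → Bool) (lim : Nat) : Nat :=
  (List.range lim).foldl (fun best c => if cond (c + 1) then c + 1 else best) 0

def pvOverlapB (read other : List Char) : Nat :=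
  pvBestAsc (pvCondB read other) (min read.length other.length)

def BestReadChevauchant_alt (Read : String) (ReadSet : List (String × List (List String))) : Option String :=
  let d := PySem.Dict.ofList ReadSet
  let pairs := d.items.map (fun p => (pvOverlapB Read.toList (((p.2.getD 0 []).getD 0 "").toList), some p.1))
  let best := PySem.List.maxD pairs (fun t => t.1) ((0 : Nat), (none : Option String))
  if 0 < best.1 then best.2 else none

-- ===== PRECONDITION & SPEC =====
-- Pre_ excludes exactly the inputs where A raises IndexError: a dict value whose list is empty or whose first element is an empty list.
def Pre_BestReadChevauchant (Read : String) (ReadSet : List (String × List (List String))) : Prop :=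
  ∀ p ∈ (PySem.Dict.ofList ReadSet).items, p.2 ≠ [] ∧ p.2.getD 0 [] ≠ []
instance (Read : String) (ReadSet : List (String × List (List String))) : Decidable (Pre_BestReadChevauchant Read ReadSet) := by unfold Pre_BestReadChevauchant; infer_instance
def pvWitness_BestReadChevauchant : String × (List (String × List (List String))) := ("ab", [("x", [["ba"]])])

def Spec_BestReadChevauchant (Read : String) (ReadSet : List (String × List (List String))) (out : Option String) : Prop := out = BestReadChevauchant_alt Read ReadSet
instance (Read : String) (ReadSet : List (String × List (List String))) (out : Option String) : Decidable (Spec_BestReadChevauchant Read ReadSet out) := by unfold Spec_BestReadChevauchant; infer_instance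

-- ===== CLAIM (what is proved, stated in full; the proofs are below) =====
def Claim_equal_BestReadChevauchant : Prop := ∀ (Read : String) (ReadSet : List (String × List (List String))), Dom_BestReadChevauchant Read ReadSet → Pre_BestReadChevauchant Read ReadSet → Spec_BestReadChevauchant Read ReadSet (BestReadChevauchant Read ReadSet)

-- ===== LEMMAS AND PROOFS =====

-- the two OR-tests agree for every c ≥ 1
lemma pvCond_eq (read other : List Char) (c : Nat) (h : 1 ≤ c) :
    pvCondA read other c = pvCondB read other c := by
  unfold pvCondA pvCondB
  rw [PySem.List.slice_to_natCast other c, PySem.List.slice_from_neg_natCast read c h,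
      PySem.List.slice_from_neg_natCast other c h, PySem.List.slice_zero_start,
      PySem.List.slice_to_natCast read c]

lemma pvBestAsc_succ (cond : Nat → Bool) (n : Nat) :
    pvBestAsc cond (n + 1) = if cond (n + 1) then n + 1 else pvBestAsc cond n := by
  simp [pvBestAsc, List.range_succ]

-- the descending break-loop equals the ascending keep-last loop (with carry when no c matches)
lemma pvWhileA_eq (condA condB : Nat → Bool) (hc : ∀ c, 1 ≤ c → condA c = condB c)
    (lmin : Nat) : ∀ n, n ≤ lmin → ∀ carry,
    pvWhileA condA lmin n carry = if pvBestAsc condB n = 0 then carry else pvBestAsc condB n := by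
  intro n
  induction n with
  | zero => intro _ carry; simp [pvWhileA, pvBestAsc]
  | succ k ih =>
    intro hle carry
    rw [pvWhileA, if_pos hle, hc (k+1) (by omega), pvBestAsc_succ]
    by_cases h : condB (k + 1)
    · simp [h]
    · simp [h, ih (by omega) carry]

-- PySem max? started from a committed element is the plain running-max fold
lemma pvMax?_cons {α κ : Type} [LT κ] [DecidableLT κ] (key : α → κ) (x : α) (t : List α) :
    PySem.List.max? (x :: t) key
      = some (t.foldl (fun m y => if key m < key y then y else m) x) := by
  show List.foldl _ (some x) t = _
  induction t generalizing x with
  | nil => rfl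
  | cons y t ih =>
    simp only [List.foldl]
    by_cases h : key x < key y <;> simp [h, ih]

-- invariant linking A's (maximum, max_chev, best_id) fold to B's running-max pair
lemma pvOuter (f : String → Nat) :
    ∀ (ks : List String) (M m : Nat) (b : Option String) (w : Nat × Option String),
    m ≤ M → w.1 = M → (0 < M → w.2 = b) → (M = 0 → b = none) →
    (let st := ks.foldl (fun (st : Nat × Nat × Option String) k =>
        let m' := if f k = 0 then st.2.1 else f k
        if st.1 < m' then (m', m', some k) else (st.1, m', st.2.2)) (M, m, b)
     let q := (ks.map (fun k => (f k, some k))).foldl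
        (fun (m : Nat × Option String) y => if m.1 < y.1 then y else m) w
     q.1 = st.1 ∧ st.2.1 ≤ st.1 ∧ (0 < st.1 → q.2 = st.2.2) ∧ (st.1 = 0 → st.2.2 = none)) := by
  intro ks
  induction ks with
  | nil =>
    intro M m b w h1 h2 h3 h4
    exact ⟨h2, h1, h3, h4⟩
  | cons k rest ih =>
    intro M m b w h1 h2 h3 h4
    simp only [List.foldl, List.map]
    by_cases hv : f k = 0
    · -- m' = m ≤ M: A keeps its state; w.1 = M ≥ 0 = f k: B keeps w
      have hA : ¬ M < m := by omega
      have hB : ¬ w.1 < f k := by omega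
      simp only [hv, if_neg hA, ite_true]
      exact ih M m b w h1 h2 h3 h4
    · have hv' : 0 < f k := Nat.pos_of_ne_zero hv
      simp only [if_neg hv]
      by_cases hlt : M < f k
      · have hB : w.1 < f k := by omega
        simp only [if_pos hlt, if_pos hB]
        exact ih (f k) (f k) (some k) (f k, some k) le_rfl rfl (fun _ => rfl) (by omega)
      · have hB : ¬ w.1 < f k := by omega
        simp only [if_neg hlt, if_neg hB]
        exact ih M (f k) b w (by omega) h2 h3 h4
    
-- ===== VERDICT (by name: the statement is the Claim_ definition above) =====
theorem BestReadChevauchant_spec : Claim_equal_BestReadChevauchant := by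
  intro Read ReadSet _ _
  unfold Spec_BestReadChevauchant
  set d := PySem.Dict.ofList ReadSet with hd
  set f : String → Nat :=
    fun k => pvOverlapB Read.toList (((d.getD k []).getD 0 []).getD 0 "").toList with hf
  -- A's loop body rewritten through pvWhileA_eq
  have hfun : (fun (st : Nat × Nat × Option String) cle =>
      let other := (((d.getD cle []).getD 0 []).getD 0 "").toList
      let lmin := min Read.toList.length other.length
      let m' := pvWhileA (pvCondA Read.toList other) lmin lmin st.2.1
      if st.1 < m' then (m', m', some cle) else (st.1, m', st.2.2))
      = (fun (st : Nat × Nat × Option String) cle =>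
         let m' := if f cle = 0 then st.2.1 else f cle
         if st.1 < m' then (m', m', some cle) else (st.1, m', st.2.2)) := by
    funext st cle
    have heq := pvWhileA_eq (pvCondA Read.toList (((d.getD cle []).getD 0 []).getD 0 "").toList)
      (pvCondB Read.toList (((d.getD cle []).getD 0 []).getD 0 "").toList)
      (fun c hc => pvCond_eq _ _ c hc)
      (min Read.toList.length (((d.getD cle []).getD 0 []).getD 0 "").toList.length)
      (min Read.toList.length (((d.getD cle []).getD 0 []).getD 0 "").toList.length)
      le_rfl st.2.1
    simp only [heq, hf, pvOverlapB]
  have main : (List.foldl (fun (st : Nat × Nat × Option String) cle =>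
         let m' := if f cle = 0 then st.2.1 else f cle
         if st.1 < m' then (m', m', some cle) else (st.1, m', st.2.2)) (0, 0, none) d.keys).2.2
      = BestReadChevauchant_alt Read ReadSet := by
    show _ = (if 0 < (PySem.List.maxD
        (d.items.map (fun p => (pvOverlapB Read.toList (((p.2.getD 0 []).getD 0 "").toList), some p.1)))
        (fun t => t.1) ((0:Nat), (none : Option String))).1
      then (PySem.List.maxD
        (d.items.map (fun p => (pvOverlapB Read.toList (((p.2.getD 0 []).getD 0 "").toList), some p.1)))
        (fun t => t.1) ((0:Nat), (none : Option String))).2 else none)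
    -- B's items walk is the keys walk of the same dict
    have hitems : d.items = d.keys.map (fun k => (k, d.getD k [])) :=
      PySem.Dict.items_eq_map_keys d (hd ▸ PySem.Dict.nodup_keys_ofList ReadSet) []
    rw [hitems, List.map_map]
    have hpairs : ((fun p : String × List (List String) =>
          (pvOverlapB Read.toList (((p.2.getD 0 []).getD 0 "").toList), some p.1))
        ∘ (fun k => (k, d.getD k []))) = fun k => ((f k, some k) : Nat × Option String) := by
      funext k; rfl
    rw [hpairs]
    cases hks : d.keys with
    | nil => simp [PySem.List.maxD, PySem.List.max?]
    | cons k rest =>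
      simp only [List.map, List.foldl]
      have hstep1 : (if f k = 0 then (0 : Nat) else f k) = f k := by split_ifs with h <;> omega
      rw [PySem.List.maxD, pvMax?_cons]
      simp only [Option.getD_some, hstep1]
      by_cases hfk : (0:Nat) < f k
      · have h := pvOuter f rest (f k) (f k) (some k) (f k, some k) le_rfl rfl (fun _ => rfl) (by omega)
        simp only [if_pos hfk]
        obtain ⟨hq1, _, hq2, hq3⟩ := h
        split_ifs with hcond
        · exact (hq2 (hq1 ▸ hcond)).symm
        · exact hq3 (by omega)
      · have h := pvOuter f rest 0 (f k) none (f k, some k) (by omega) (by omega)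
          (by omega) (fun _ => rfl)
        simp only [if_neg hfk]
        obtain ⟨hq1, _, hq2, hq3⟩ := h
        split_ifs with hcond
        · exact (hq2 (hq1 ▸ hcond)).symm
        · exact hq3 (by omega)
  refine Eq.trans ?_ main
  exact congrArg (fun g => (List.foldl g ((0:Nat), (0:Nat), (none : Option String)) d.keys).2.2) hfun
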